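-- pv_equiv track=rewrite | github.com/pisterlabs/promptset | data/scraping-2.0/repos/JacobH140~PartnerGPT/make_cards.py | format_and_sort_phonetic_info
-- ===== SOURCE A (Python) =====
-- def format_and_sort_phonetic_info(data):
--     # Define the order of the sort categories
--     sort_order = ['Exact Match (with tone)', 'Syllable Match (without tone)', 'Rhymes (similar finals)', 'Alliterates (similar initials)', 'No Regularity']
--
--     # Initialize the string to hold the formatted results
--     formatted_results = ""
--
--     # For each character and its components in the data...
--     for character, components in data:
--         # Filter out components with 'No Regularity'
--         components = [component for component in components if component[2] != 'No Regularity']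
--
--         # Sort the components according to the sort order
--         components.sort(key=lambda x: sort_order.index(x[2].split(' with ')[0]) if x[2] and x[2].split(' with ')[0] in sort_order else len(sort_order))
--
--         # Add the character to the formatted results
--         formatted_results += f'{character}\\n'
--
--         # For each sorted component...
--         for component, reading, regularity in components:
--             # If the component has a regularity and a reading...
--             if regularity and reading:
--                 # Add the component, its reading, and its regularity to the formatted results
--                 formatted_results += f' - {component} ({reading}): {regularity}\\n'
--             # If the component doesn't have a regularity or a reading...
--             else:
--                 # Add just the component to the formatted results
--                 formatted_results += f' - {component}\\n'
--
--     # Return the formatted results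
--     return formatted_results
-- ===== SOURCE B (Python) =====
-- def format_and_sort_phonetic_info(data):
--     # Bucket (counting) sort by category rank instead of list.sort; build the
--     # output as a list of pieces joined once instead of repeated string +=.
--     sort_order = ['Exact Match (with tone)', 'Syllable Match (without tone)', 'Rhymes (similar finals)', 'Alliterates (similar initials)', 'No Regularity']
--     n = len(sort_order)
--     pieces = []
--     for character, components in data:
--         buckets = [[] for _ in range(n + 1)]
--         for comp in components:
--             if comp[2] == 'No Regularity':
--                 continue
--             cat = comp[2].split(' with ')[0]
--             rank = sort_order.index(cat) if comp[2] and cat in sort_order else n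
--             buckets[rank].append(comp)
--         pieces.append(f'{character}\\n')
--         for bucket in buckets:
--             for component, reading, regularity in bucket:
--                 if regularity and reading:
--                     pieces.append(f' - {component} ({reading}): {regularity}\\n')
--                 else:
--                     pieces.append(f' - {component}\\n')
--     return ''.join(pieces)
-- ===== Notes on version B (the rewrite author's own statement) =====
-- stated objective: alternative
-- what changed: Replaces the comparison sort (list.sort with an index-lookup key) by a one-pass bucket/counting sort into len(sort_order)+1 rank buckets concatenated in order (stability for free), and builds the output as a list of pieces joined once instead of repeated string +=.
import Mathlib
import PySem

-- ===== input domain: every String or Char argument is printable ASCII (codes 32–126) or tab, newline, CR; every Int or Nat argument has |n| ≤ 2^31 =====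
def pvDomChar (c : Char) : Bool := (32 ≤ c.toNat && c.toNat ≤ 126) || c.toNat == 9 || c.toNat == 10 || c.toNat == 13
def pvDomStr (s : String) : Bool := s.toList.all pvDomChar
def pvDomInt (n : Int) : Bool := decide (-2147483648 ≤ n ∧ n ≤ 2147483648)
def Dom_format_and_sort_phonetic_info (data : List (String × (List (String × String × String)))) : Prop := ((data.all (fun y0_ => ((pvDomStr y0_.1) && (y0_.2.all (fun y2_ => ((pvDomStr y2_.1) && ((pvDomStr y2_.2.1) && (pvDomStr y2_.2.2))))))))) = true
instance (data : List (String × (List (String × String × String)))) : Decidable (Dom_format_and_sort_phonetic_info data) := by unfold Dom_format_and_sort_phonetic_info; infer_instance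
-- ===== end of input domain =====

-- B replaces list.sort with a one-pass bucket (counting) sort by category rank and
-- joins the output pieces once instead of repeated string concatenation (objective: alternative).

-- Shared helpers (both Pythons compute the category, the sort key and the two
-- formatted-line shapes identically; the source f-strings contain a literal '\n'
-- escape, i.e. backslash + 'n', reproduced here as "\\n").
def pvSortOrder : List String := ["Exact Match (with tone)", "Syllable Match (without tone)", "Rhymes (similar finals)", "Alliterates (similar initials)", "No Regularity"]

-- x[2].split(' with ')[0]; the separator is nonempty so split? is some and the
-- result of a split is never empty, hence the catch-all arm is unreachable.
def pvCat (reg : String) : String :=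
  match PySem.Str.split? reg " with " with
  | some (c :: _) => c
  | _ => ""

-- sort_order.index(x[2].split(' with ')[0]) if x[2] and … in sort_order else len(sort_order)
-- (index? is guarded by the membership test, so it is some; getD 0 is never taken).
def pvRank (c : String × String × String) : Int :=
  if (c.2.2 != "") && pvSortOrder.contains (pvCat c.2.2) then
    (((PySem.List.index? pvSortOrder (pvCat c.2.2)).getD 0 : Nat) : Int)
  else 5

-- the two f-string line shapes (regularity and reading truthy = nonempty)
def pvLine (c : String × String × String) : String :=
  if (c.2.2 != "") && (c.2.1 != "") then
    " - " ++ c.1 ++ " (" ++ c.2.1 ++ "): " ++ c.2.2 ++ "\\n"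
  else
    " - " ++ c.1 ++ "\\n"

-- ===== PORT A =====
def format_and_sort_phonetic_info (data : List (String × (List (String × String × String)))) : String :=
  data.foldl (fun acc p =>
    let comps := p.2.filter (fun c => c.2.2 != "No Regularity")
    let comps := PySem.List.sorted comps pvRank
    let acc := acc ++ p.1 ++ "\\n"
    comps.foldl (fun acc c => acc ++ pvLine c) acc) ""

-- ===== PORT B =====
def format_and_sort_phonetic_info_alt (data : List (String × (List (String × String × String)))) : String :=
  PySem.Str.join "" (data.foldl (fun pieces p =>
    let buckets := p.2.foldl
      (fun (bs : List (List (String × String × String))) c =>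
        if c.2.2 == "No Regularity" then bs
        else bs.modify (pvRank c).toNat (fun b => b ++ [c]))
      (List.replicate 6 [])
    let pieces := pieces ++ [p.1 ++ "\\n"]
    buckets.foldl (fun pieces b => b.foldl (fun pieces c => pieces ++ [pvLine c]) pieces) pieces) [])

-- ===== PRECONDITION & SPEC =====
def Spec_format_and_sort_phonetic_info (data : List (String × (List (String × String × String)))) (out : String) : Prop := out = format_and_sort_phonetic_info_alt data
instance (data : List (String × (List (String × String × String)))) (out : String) : Decidable (Spec_format_and_sort_phonetic_info data out) := by unfold Spec_format_and_sort_phonetic_info; infer_instance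

-- ===== CLAIM (what is proved, stated in full; the proofs are below) =====
def Claim_equal_format_and_sort_phonetic_info : Prop := ∀ (data : List (String × (List (String × String × String)))), Dom_format_and_sort_phonetic_info data → Spec_format_and_sort_phonetic_info data (format_and_sort_phonetic_info data)

-- ===== LEMMAS AND PROOFS =====

-- the rank is a Nat below 6
lemma pv_index_getD_le (l : List String) (s : String) : (PySem.List.index? l s).getD 0 ≤ l.length := by
  induction l with
  | nil => simp [PySem.List.index?]
  | cons a t ih =>
    simp only [PySem.List.index?, List.idxOf?_cons] at *
    by_cases h : a == s <;> simp [h] <;> cases ht : List.idxOf? s t <;> simp_all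

lemma pvRank_nonneg (c : String × String × String) : 0 ≤ pvRank c := by
  unfold pvRank; split <;> positivity

lemma pvRank_toNat_lt (c : String × String × String) : (pvRank c).toNat < 6 := by
  unfold pvRank; split
  · have := pv_index_getD_le pvSortOrder (pvCat c.2.2)
    simp [pvSortOrder] at this ⊢; omega
  · simp

-- insertBy structural equation (definitional)
lemma pv_ib_cons {α : Type} (b : α → α → Bool) (x y : α) (ys : List α) :
    PySem.List.insertBy b x (y :: ys) = if b x y then x :: y :: ys else y :: PySem.List.insertBy b x ys := rfl

lemma pv_ib_append_not {α : Type} (b : α → α → Bool) (x : α) (L M : List α)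
    (hL : ∀ y ∈ L, b x y = false) :
    PySem.List.insertBy b x (L ++ M) = L ++ PySem.List.insertBy b x M := by
  induction L with
  | nil => simp
  | cons a t ih =>
    have ha := hL a (by simp)
    rw [List.cons_append, pv_ib_cons, ha, ih (fun y hy => hL y (by simp [hy]))]
    simp

lemma pv_ib_all {α : Type} (b : α → α → Bool) (x : α) (M : List α)
    (hM : ∀ y ∈ M, b x y = true) :
    PySem.List.insertBy b x M = x :: M := by
  cases M with
  | nil => rfl
  | cons y ys => rw [pv_ib_cons, if_pos (hM y (by simp))]

lemma pv_ib_mid {α : Type} (b : α → α → Bool) (x : α) (L M : List α)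
    (hL : ∀ y ∈ L, b x y = false) (hM : ∀ y ∈ M, b x y = true) :
    PySem.List.insertBy b x (L ++ M) = L ++ x :: M := by
  rw [pv_ib_append_not b x L M hL, pv_ib_all b x M hM]

-- buckets of the filtered component list
def pvBuck (xs : List (String × String × String)) (i : Nat) : List (String × String × String) :=
  xs.filter (fun c => (pvRank c).toNat == i)

lemma pv_mem_pvBuck {y : String × String × String} {xs : List (String × String × String)} {i : Nat}
    (h : y ∈ pvBuck xs i) : (pvRank y).toNat = i := by
  simp [pvBuck, List.mem_filter] at h; exact h.2

lemma pvBuck_append (xs : List (String × String × String)) (x : String × String × String) (i : Nat) :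
    pvBuck (xs ++ [x]) i = pvBuck xs i ++ (if (pvRank x).toNat == i then [x] else []) := by
  simp [pvBuck, List.filter_append, List.filter_singleton]

-- the before-predicate of A's sort, decided through toNat
lemma pv_before_eq (x y : String × String × String) :
    (decide (pvRank x < pvRank y)) = decide ((pvRank x).toNat < (pvRank y).toNat) := by
  have hx := pvRank_nonneg x; have hy := pvRank_nonneg y
  by_cases h : pvRank x < pvRank y <;> simp [h] <;> omega

-- inserting x into the bucket concatenation appends it to its own bucket
lemma pv_ib_flatten (x : String × String × String) (xs : List (String × String × String)) :
    ∀ (n lo : Nat), lo ≤ (pvRank x).toNat → (pvRank x).toNat < lo + n →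
    PySem.List.insertBy (fun a b => decide (pvRank a < pvRank b)) x
        (((List.range' lo n).map (pvBuck xs)).flatten)
      = ((List.range' lo n).map (pvBuck (xs ++ [x]))).flatten := by
  intro n
  induction n with
  | zero => intro lo h1 h2; omega
  | succ n ih =>
    intro lo h1 h2
    rw [List.range'_succ]
    simp only [List.map_cons, List.flatten_cons]
    by_cases hk : (pvRank x).toNat = lo
    · rw [pv_ib_mid]
      · rw [pvBuck_append xs x lo, if_pos (by simp [hk])]
        have hrest : ((List.range' (lo + 1) n).map (pvBuck (xs ++ [x]))) =
            ((List.range' (lo + 1) n).map (pvBuck xs)) := by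
          apply List.map_congr_left
          intro i hi
          rw [pvBuck_append xs x i, if_neg (by simp [List.mem_range'_1] at hi; simp; omega)]
          simp
        rw [hrest]; simp
      · intro y hy
        have := pv_mem_pvBuck hy
        rw [pv_before_eq]; simp; omega
      · intro y hy
        simp only [List.mem_flatten, List.mem_map] at hy
        obtain ⟨l, ⟨i, hi, rfl⟩, hyl⟩ := hy
        have := pv_mem_pvBuck hyl
        simp [List.mem_range'_1] at hi
        rw [pv_before_eq]; simp; omega
    · rw [pv_ib_append_not]
      · rw [pvBuck_append xs x lo, if_neg (by simp [hk]), List.append_nil,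
            ih (lo + 1) (by omega) (by omega)]
      · intro y hy
        have := pv_mem_pvBuck hy
        rw [pv_before_eq]; simp; omega

-- A's stable sort of the filtered list IS the concatenation of the six rank buckets
lemma pv_insfold_buckets (xs : List (String × String × String)) :
    xs.foldl (fun acc x => PySem.List.insertBy (fun a b => decide (pvRank a < pvRank b)) x acc) []
      = ((List.range 6).map (pvBuck xs)).flatten := by
  induction xs using List.reverseRecOn with
  | nil => simp [pvBuck]
  | append_singleton xs x ih =>
    rw [List.foldl_append, List.foldl_cons, List.foldl_nil, ih]
    rw [List.range_eq_range']
    exact pv_ib_flatten x xs 6 0 (by omega) (by have := pvRank_toNat_lt x; omega)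

lemma pv_sorted_buckets (xs : List (String × String × String)) :
    PySem.List.sorted xs pvRank = ((List.range 6).map (pvBuck xs)).flatten := by
  rw [PySem.List.sorted_eq_foldl_insertBy, pv_insfold_buckets]

-- B's bucket-building loop produces exactly those buckets
lemma pv_bfold (xs : List (String × String × String)) :
    xs.foldl (fun (bs : List (List (String × String × String))) c =>
        bs.modify (pvRank c).toNat (fun b => b ++ [c])) (List.replicate 6 [])
      = (List.range 6).map (pvBuck xs) := by
  induction xs using List.reverseRecOn with
  | nil => rfl
  | append_singleton xs x ih =>
    rw [List.foldl_append, List.foldl_cons, List.foldl_nil, ih]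
    apply List.ext_getElem
    · simp
    · intro j hj hj'
      have hj6 : j < 6 := by simpa using hj'
      rw [List.getElem_modify]
      simp only [List.getElem_map, List.getElem_range]
      rw [pvBuck_append xs x j]
      by_cases h : (pvRank x).toNat = j <;> simp [h]

-- B's skip-'No Regularity' loop is the same loop over A's filtered list
lemma pv_bfold_filter (xs : List (String × String × String)) (init : List (List (String × String × String))) :
    xs.foldl (fun bs c =>
        if c.2.2 == "No Regularity" then bs
        else bs.modify (pvRank c).toNat (fun b => b ++ [c])) init
      = (xs.filter (fun c => c.2.2 != "No Regularity")).foldl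
          (fun bs c => bs.modify (pvRank c).toNat (fun b => b ++ [c])) init := by
  rw [← PySem.List.foldl_if_eq_foldl_filter]
  apply PySem.List.foldl_congr_mem
  intro acc c _
  by_cases h : c.2.2 = "No Regularity" <;> simp [h]

-- ''.join with empty separator
lemma pv_flatten_intersperse_nil (xs : List (List Char)) :
    (List.intersperse ([] : List Char) xs).flatten = xs.flatten := by
  induction xs with
  | nil => simp
  | cons a t ih => cases t <;> simp_all [List.intersperse]

lemma pv_joinE_cons (s : String) (l : List String) :
    PySem.Str.join "" (s :: l) = s ++ PySem.Str.join "" l := by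
  simp [PySem.Str.join, PySem.Chars.join, List.intercalate, pv_flatten_intersperse_nil, String.ofList_append]

lemma pv_joinE_append (l1 l2 : List String) :
    PySem.Str.join "" (l1 ++ l2) = PySem.Str.join "" l1 ++ PySem.Str.join "" l2 := by
  induction l1 with
  | nil => simp [PySem.Str.join, PySem.Chars.join, List.intercalate]
  | cons s t ih => simp [pv_joinE_cons, ih, String.append_assoc]

-- A's inner 'formatted_results += line' loop
lemma pv_strfold (l : List (String × String × String)) (acc : String) :
    l.foldl (fun a c => a ++ pvLine c) acc = acc ++ PySem.Str.join "" (l.map pvLine) := by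
  induction l generalizing acc with
  | nil => simp [PySem.Str.join, PySem.Chars.join, List.intercalate]
  | cons c t ih => simp [ih, pv_joinE_cons, String.append_assoc]

-- B's nested pieces-appending loops
lemma pv_piecesfold (buckets : List (List (String × String × String))) (pieces : List String) :
    buckets.foldl (fun ps b => b.foldl (fun ps c => ps ++ [pvLine c]) ps) pieces
      = pieces ++ buckets.flatten.map pvLine := by
  induction buckets generalizing pieces with
  | nil => simp
  | cons b bs ih =>
    rw [List.foldl_cons, PySem.List.foldl_append_singleton_eq_map, ih]
    simp

lemma pv_main (data : List (String × (List (String × String × String)))) :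
    ∀ (acc : String) (pieces : List String), acc = PySem.Str.join "" pieces →
    data.foldl (fun acc p =>
        let comps := p.2.filter (fun c => c.2.2 != "No Regularity")
        let comps := PySem.List.sorted comps pvRank
        let acc := acc ++ p.1 ++ "\\n"
        comps.foldl (fun acc c => acc ++ pvLine c) acc) acc
      = PySem.Str.join "" (data.foldl (fun pieces p =>
          let buckets := p.2.foldl
            (fun (bs : List (List (String × String × String))) c =>
              if c.2.2 == "No Regularity" then bs
              else bs.modify (pvRank c).toNat (fun b => b ++ [c]))
            (List.replicate 6 [])
          let pieces := pieces ++ [p.1 ++ "\\n"]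
          buckets.foldl (fun pieces b => b.foldl (fun pieces c => pieces ++ [pvLine c]) pieces) pieces) pieces) := by
  induction data with
  | nil => intro acc pieces h; simpa using h
  | cons p rest ih =>
    intro acc pieces h
    rw [List.foldl_cons, List.foldl_cons]
    apply ih
    simp only [pv_bfold_filter, pv_bfold, pv_strfold, pv_piecesfold, pv_sorted_buckets]
    rw [pv_joinE_append, pv_joinE_append, pv_joinE_cons]
    simp [h, String.append_assoc, PySem.Str.join, PySem.Chars.join, List.intercalate]

-- ===== VERDICT (by name: the statement is the Claim_ definition above) =====
theorem format_and_sort_phonetic_info_spec : Claim_equal_format_and_sort_phonetic_info := by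
  intro data _
  unfold Spec_format_and_sort_phonetic_info format_and_sort_phonetic_info format_and_sort_phonetic_info_alt
  exact pv_main data "" [] rfl
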